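-- pv_equiv track=rewrite | github.com/YianXie/LucidTree | src/lucidtree/go/rules.py | gtp_move_is_valid
-- ===== SOURCE A (Python) =====
-- def gtp_move_is_valid(gtp_move: str) -> bool:
--     """
--     Check if the given GTP move is valid
--
--     Args:
--         gtp_move (str): the GTP move
--
--     Returns:
--         bool: True if the GTP move is valid, False otherwise
--     """
--     gtp_move = gtp_move.strip().upper()
--     if gtp_move == "PASS":
--         return True
--     if not gtp_move or gtp_move[0] not in "ABCDEFGHJKLMNOPQRSTUVWXYZ":
--         return False
--     for char in gtp_move[1:]:
--         if char not in "1234567890":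
--             return False
--     return True
-- ===== SOURCE B (Python) =====
-- import re
--
-- _GTP_RE = re.compile(r'[A-HJ-Z][0-9]*')
--
-- def gtp_move_is_valid(gtp_move: str) -> bool:
--     gtp_move = gtp_move.strip().upper()
--     if gtp_move == "PASS":
--         return True
--     return _GTP_RE.fullmatch(gtp_move) is not None
-- ===== Notes on version B (the rewrite author's own statement) =====
-- stated objective: idiomatic
-- what changed: Replaces the explicit first-character membership check and the per-character digit loop with a single precompiled regex fullmatch [A-HJ-Z][0-9]*.
import Mathlib
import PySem

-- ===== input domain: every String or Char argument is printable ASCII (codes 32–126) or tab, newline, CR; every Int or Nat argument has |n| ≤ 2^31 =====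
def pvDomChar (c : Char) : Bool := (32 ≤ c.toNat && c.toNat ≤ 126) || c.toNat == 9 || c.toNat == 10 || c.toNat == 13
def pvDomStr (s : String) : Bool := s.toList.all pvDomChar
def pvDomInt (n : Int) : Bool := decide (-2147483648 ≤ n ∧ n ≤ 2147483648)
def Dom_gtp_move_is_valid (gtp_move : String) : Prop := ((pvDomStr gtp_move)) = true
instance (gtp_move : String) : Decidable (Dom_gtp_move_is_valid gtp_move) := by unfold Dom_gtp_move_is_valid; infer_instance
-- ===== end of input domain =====

-- B replaces A's explicit first-char membership test and per-character digit loop with a single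
-- regex fullmatch of [A-HJ-Z][0-9]* (idiomatic; same asymptotic cost).

-- ===== PORT A =====
-- the for-loop over gtp_move[1:] with its early 'return False'
def gtpDigitsLoopA : List Char → Bool
  | [] => true
  | c :: rest => if ("1234567890".toList.contains c) then gtpDigitsLoopA rest else false

def gtp_move_is_valid (gtp_move : String) : Bool :=
  if PySem.Str.upper (PySem.Str.strip gtp_move) = "PASS" then true
  else
    match (PySem.Str.upper (PySem.Str.strip gtp_move)).toList with
    | [] => false                     -- 'not gtp_move' branch
    | c :: rest =>                    -- c is gtp_move[0], rest is gtp_move[1:]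
      if "ABCDEFGHJKLMNOPQRSTUVWXYZ".toList.contains c then gtpDigitsLoopA rest
      else false

-- ===== PORT B =====
-- re.fullmatch(r'[A-HJ-Z][0-9]*', t) ≠ None: exactly one char of the class A–Z minus I,
-- followed by zero or more chars of the class 0–9 (ported as the automaton the regex denotes)
def gtp_move_is_valid_alt (gtp_move : String) : Bool :=
  if PySem.Str.upper (PySem.Str.strip gtp_move) = "PASS" then true
  else
    match (PySem.Str.upper (PySem.Str.strip gtp_move)).toList with
    | [] => false
    | c :: rest => ('A' ≤ c && c ≤ 'Z' && c ≠ 'I') && rest.all (fun d => '0' ≤ d && d ≤ '9')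

-- ===== PRECONDITION & SPEC =====
def Spec_gtp_move_is_valid (gtp_move : String) (out : Bool) : Prop := out = gtp_move_is_valid_alt gtp_move
instance (gtp_move : String) (out : Bool) : Decidable (Spec_gtp_move_is_valid gtp_move out) := by unfold Spec_gtp_move_is_valid; infer_instance

-- ===== CLAIM (what is proved, stated in full; the proofs are below) =====
def Claim_equal_gtp_move_is_valid : Prop := ∀ (gtp_move : String), Dom_gtp_move_is_valid gtp_move → Spec_gtp_move_is_valid gtp_move (gtp_move_is_valid gtp_move)

-- ===== LEMMAS AND PROOFS =====
theorem letters_mem_eq_range (c : Char) :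
    ("ABCDEFGHJKLMNOPQRSTUVWXYZ".toList.contains c) = ('A' ≤ c && c ≤ 'Z' && c ≠ 'I') := by
  have hl : "ABCDEFGHJKLMNOPQRSTUVWXYZ".toList =
      ['A','B','C','D','E','F','G','H','J','K','L','M','N','O','P','Q','R','S','T','U','V','W','X','Y','Z'] := by decide
  have hA : ('A' : Char).val.toNat = 65 := rfl
  have hB : ('B' : Char).val.toNat = 66 := rfl
  have hC : ('C' : Char).val.toNat = 67 := rfl
  have hD : ('D' : Char).val.toNat = 68 := rfl
  have hE : ('E' : Char).val.toNat = 69 := rfl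
  have hF : ('F' : Char).val.toNat = 70 := rfl
  have hG : ('G' : Char).val.toNat = 71 := rfl
  have hH : ('H' : Char).val.toNat = 72 := rfl
  have hI : ('I' : Char).val.toNat = 73 := rfl
  have hJ : ('J' : Char).val.toNat = 74 := rfl
  have hK : ('K' : Char).val.toNat = 75 := rfl
  have hL : ('L' : Char).val.toNat = 76 := rfl
  have hM : ('M' : Char).val.toNat = 77 := rfl
  have hN : ('N' : Char).val.toNat = 78 := rfl
  have hO : ('O' : Char).val.toNat = 79 := rfl
  have hP : ('P' : Char).val.toNat = 80 := rfl
  have hQ : ('Q' : Char).val.toNat = 81 := rfl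
  have hR : ('R' : Char).val.toNat = 82 := rfl
  have hS : ('S' : Char).val.toNat = 83 := rfl
  have hT : ('T' : Char).val.toNat = 84 := rfl
  have hU : ('U' : Char).val.toNat = 85 := rfl
  have hV : ('V' : Char).val.toNat = 86 := rfl
  have hW : ('W' : Char).val.toNat = 87 := rfl
  have hX : ('X' : Char).val.toNat = 88 := rfl
  have hY : ('Y' : Char).val.toNat = 89 := rfl
  have hZ : ('Z' : Char).val.toNat = 90 := rfl
  rw [hl, Bool.eq_iff_iff]
  simp only [List.contains_cons, List.contains_nil, Bool.or_false, Bool.or_eq_true,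
    Bool.and_eq_true, beq_iff_eq, decide_eq_true_eq, ne_eq, Char.ext_iff, UInt32.ext_iff,
    Char.le_def, UInt32.le_iff_toNat_le, hA, hB, hC, hD, hE, hF, hG, hH, hI, hJ, hK, hL, hM, hN, hO, hP, hQ, hR, hS, hT, hU, hV, hW, hX, hY, hZ]
  omega

theorem digits_mem_eq_range (c : Char) :
    ("1234567890".toList.contains c) = ('0' ≤ c && c ≤ '9') := by
  have hl : "1234567890".toList = ['1','2','3','4','5','6','7','8','9','0'] := by decide
  have h0 : ('0' : Char).val.toNat = 48 := rfl
  have h1 : ('1' : Char).val.toNat = 49 := rfl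
  have h2 : ('2' : Char).val.toNat = 50 := rfl
  have h3 : ('3' : Char).val.toNat = 51 := rfl
  have h4 : ('4' : Char).val.toNat = 52 := rfl
  have h5 : ('5' : Char).val.toNat = 53 := rfl
  have h6 : ('6' : Char).val.toNat = 54 := rfl
  have h7 : ('7' : Char).val.toNat = 55 := rfl
  have h8 : ('8' : Char).val.toNat = 56 := rfl
  have h9 : ('9' : Char).val.toNat = 57 := rfl
  rw [hl, Bool.eq_iff_iff]
  simp only [List.contains_cons, List.contains_nil, Bool.or_false, Bool.or_eq_true,
    Bool.and_eq_true, beq_iff_eq, decide_eq_true_eq, Char.ext_iff, UInt32.ext_iff,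
    Char.le_def, UInt32.le_iff_toNat_le, h0, h1, h2, h3, h4, h5, h6, h7, h8, h9]
  omega

theorem gtpDigitsLoopA_eq_all (l : List Char) :
    gtpDigitsLoopA l = l.all (fun d => '0' ≤ d && d ≤ '9') := by
  induction l with
  | nil => rfl
  | cons c rest ih =>
    rw [gtpDigitsLoopA, digits_mem_eq_range, List.all_cons, ih]
    split_ifs with h
    · rw [h, Bool.true_and]
    · rw [Bool.eq_false_iff.mpr h, Bool.false_and]

-- ===== VERDICT (by name: the statement is the Claim_ definition above) =====
theorem gtp_move_is_valid_spec : Claim_equal_gtp_move_is_valid := by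
  intro s _
  unfold Spec_gtp_move_is_valid gtp_move_is_valid gtp_move_is_valid_alt
  split_ifs with h
  · rfl
  · cases hl : (PySem.Str.upper (PySem.Str.strip s)).toList with
    | nil => rfl
    | cons c rest =>
      simp only [letters_mem_eq_range, gtpDigitsLoopA_eq_all]
      split_ifs with h2
      · rw [h2, Bool.true_and]
      · rw [Bool.eq_false_iff.mpr h2, Bool.false_and]
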